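-- pv_equiv track=rewrite | github.com/Pruthwik/Performance-Metrics-For-POS-And-Chunk | precision_recall_score_chunking.py | process_lines_prepare_gold_and_system_outputs
-- ===== SOURCE A (Python) =====
-- def process_lines_prepare_gold_and_system_outputs(lines):
--     """Process input lines and prepare gold and system outputs."""
--     gold_all, pred_all, temp_gold, temp_pred = list(), list(), list(), list()
--     for line in lines:
--         line = line.strip()
--         if line:
--             gold, pred = line.split()[-2:]
--             temp_gold.append(gold)
--             temp_pred.append(pred)
--         else:
--             assert len(temp_gold) == len(temp_pred)
--             gold_all.append(temp_gold)
--             pred_all.append(temp_pred)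
--             temp_gold, temp_pred = list(), list()
--     if temp_gold and temp_pred:
--         assert len(temp_gold) == len(temp_pred)
--         gold_all.append(temp_gold)
--         pred_all.append(temp_pred)
--     return gold_all, pred_all
-- ===== SOURCE B (Python) =====
-- def process_lines_prepare_gold_and_system_outputs(lines):
--     """Two-phase rewrite: first group the stripped lines into blocks separated
--     by blank lines, then extract gold/pred token columns per block."""
--     stripped = [line.strip() for line in lines]
--     blocks, cur = [], []
--     for s in stripped:
--         if s:
--             cur.append(s)
--         else:
--             blocks.append(cur)
--             cur = []
--     if cur:
--         blocks.append(cur)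
--     gold_all = [[line.split()[-2] for line in block] for block in blocks]
--     pred_all = [[line.split()[-1] for line in block] for block in blocks]
--     return gold_all, pred_all
-- ===== Notes on version B (the rewrite author's own statement) =====
-- stated objective: alternative
-- what changed: Replaces A's single loop that interleaves grouping with token extraction over four accumulators by a two-phase decomposition: first group the stripped lines into blank-separated blocks, then map each block to its gold column and to its pred column in separate passes.
import Mathlib
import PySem

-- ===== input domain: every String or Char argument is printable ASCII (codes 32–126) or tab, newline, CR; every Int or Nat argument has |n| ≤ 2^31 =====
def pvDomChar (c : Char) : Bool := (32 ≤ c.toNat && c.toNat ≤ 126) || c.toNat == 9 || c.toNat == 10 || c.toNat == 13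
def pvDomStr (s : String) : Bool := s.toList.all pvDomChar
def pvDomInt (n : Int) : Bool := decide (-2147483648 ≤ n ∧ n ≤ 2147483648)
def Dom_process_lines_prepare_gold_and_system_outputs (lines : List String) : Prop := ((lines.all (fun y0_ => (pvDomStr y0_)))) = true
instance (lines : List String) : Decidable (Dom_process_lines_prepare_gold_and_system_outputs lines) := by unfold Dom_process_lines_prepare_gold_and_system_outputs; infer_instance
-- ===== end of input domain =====

-- B is an alternative two-phase decomposition (group blank-separated blocks first, then
-- extract the gold/pred columns per block); same asymptotic cost as A.

-- ===== PORT A =====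
-- state: (gold_all, pred_all, temp_gold, temp_pred)
def pvAStep (st : List (List String) × List (List String) × List String × List String)
    (line : String) : List (List String) × List (List String) × List String × List String :=
  let l := PySem.Str.strip line
  if l ≠ "" then
    -- gold, pred = line.split()[-2:]  (Python raises ValueError when fewer than two
    -- tokens; that input is excluded by Pre_, the fallback branch keeps the port total)
    match PySem.List.slice (PySem.Str.split₀ l) (some (-2)) none with
    | [gold, pred] => (st.1, st.2.1, st.2.2.1 ++ [gold], st.2.2.2 ++ [pred])
    | _ => st
  else
    (st.1 ++ [st.2.2.1], st.2.1 ++ [st.2.2.2], [], [])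

def process_lines_prepare_gold_and_system_outputs (lines : List String) : List (List String) × List (List String) :=
  let st := lines.foldl pvAStep ([], [], [], [])
  if st.2.2.1 ≠ [] ∧ st.2.2.2 ≠ [] then
    (st.1 ++ [st.2.2.1], st.2.1 ++ [st.2.2.2])
  else
    (st.1, st.2.1)

-- ===== PORT B =====
-- blank-line grouping: state (blocks, cur)
def pvBGroupStep (st : List (List String) × List String) (s : String) :
    List (List String) × List String :=
  if s ≠ "" then (st.1, st.2 ++ [s]) else (st.1 ++ [st.2], [])

-- line.split()[-2] / line.split()[-1]; default "" unreachable under Pre_ (Python raises IndexError)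
def pvGold (l : String) : String := PySem.List.pyGetD (PySem.Str.split₀ l) (-2) ""
def pvPred (l : String) : String := PySem.List.pyGetD (PySem.Str.split₀ l) (-1) ""

def process_lines_prepare_gold_and_system_outputs_alt (lines : List String) : List (List String) × List (List String) :=
  let stripped := lines.map PySem.Str.strip
  let st := stripped.foldl pvBGroupStep ([], [])
  let blocks := if st.2 ≠ [] then st.1 ++ [st.2] else st.1
  (blocks.map (fun b => b.map pvGold), blocks.map (fun b => b.map pvPred))

-- ===== PRECONDITION & SPEC =====
-- Pre_ excludes exactly the inputs on which Python A raises: a line that strips to a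
-- non-empty string with fewer than two whitespace-separated tokens (ValueError on unpack).
def Pre_process_lines_prepare_gold_and_system_outputs (lines : List String) : Prop :=
  ∀ l ∈ lines, PySem.Str.strip l ≠ "" → 2 ≤ (PySem.Str.split₀ (PySem.Str.strip l)).length
instance (lines : List String) : Decidable (Pre_process_lines_prepare_gold_and_system_outputs lines) := by unfold Pre_process_lines_prepare_gold_and_system_outputs; infer_instance

def pvWitness_process_lines_prepare_gold_and_system_outputs : List String :=
  ["The DT B-NP", "dog NN I-NP", "", "ran VBD B-VP"]

def Spec_process_lines_prepare_gold_and_system_outputs (lines : List String) (out : List (List String) × List (List String)) : Prop := out = process_lines_prepare_gold_and_system_outputs_alt lines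
instance (lines : List String) (out : List (List String) × List (List String)) : Decidable (Spec_process_lines_prepare_gold_and_system_outputs lines out) := by unfold Spec_process_lines_prepare_gold_and_system_outputs; infer_instance

-- ===== CLAIM (what is proved, stated in full; the proofs are below) =====
def Claim_equal_process_lines_prepare_gold_and_system_outputs : Prop := ∀ (lines : List String), Dom_process_lines_prepare_gold_and_system_outputs lines → Pre_process_lines_prepare_gold_and_system_outputs lines → Spec_process_lines_prepare_gold_and_system_outputs lines (process_lines_prepare_gold_and_system_outputs lines)

-- ===== LEMMAS AND PROOFS =====

-- last-two-slice of a list with at least two elements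
lemma drop_len_sub_two {α : Type} (xs : List α) (h : 2 ≤ xs.length) :
    xs.drop (xs.length - 2) = [xs[xs.length - 2], xs[xs.length - 1]] := by
  apply List.ext_getElem
  · simp; omega
  · intro i h1 h2
    have hi : i = 0 ∨ i = 1 := by
      simp only [List.length_cons, List.length_nil] at h2; omega
    rcases hi with rfl | rfl <;> simp only [List.getElem_drop] <;> simp <;> congr 1 <;> omega

lemma slice_last_two (xs : List String) (h : 2 ≤ xs.length) :
    PySem.List.slice xs (some (-2)) none = [xs[xs.length - 2], xs[xs.length - 1]] := by
  rw [PySem.List.slice_from_neg_ofNat xs 2 (by omega)]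
  exact drop_len_sub_two xs h

lemma pvGold_eq (l : String) (h : 2 ≤ (PySem.Str.split₀ l).length) :
    pvGold l = (PySem.Str.split₀ l)[(PySem.Str.split₀ l).length - 2] := by
  unfold pvGold
  rw [PySem.List.pyGetD_neg_ofNat _ 2 _ (by omega) h]

lemma pvPred_eq (l : String) (h : 2 ≤ (PySem.Str.split₀ l).length) :
    pvPred l = (PySem.Str.split₀ l)[(PySem.Str.split₀ l).length - 1] := by
  unfold pvPred
  rw [PySem.List.pyGetD_neg_ofNat _ 1 _ (by omega) (by omega)]

-- main invariant: from corresponding states, A's loop+finalize equals B's answer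
lemma pv_inv (ls : List String)
    (hpre : ∀ l ∈ ls, PySem.Str.strip l ≠ "" → 2 ≤ (PySem.Str.split₀ (PySem.Str.strip l)).length)
    (bs : List (List String)) (cur : List String) :
    (let st := ls.foldl pvAStep (bs.map (fun b => b.map pvGold), bs.map (fun b => b.map pvPred),
        cur.map pvGold, cur.map pvPred)
     if st.2.2.1 ≠ [] ∧ st.2.2.2 ≠ [] then (st.1 ++ [st.2.2.1], st.2.1 ++ [st.2.2.2])
     else (st.1, st.2.1))
    = (let st := (ls.map PySem.Str.strip).foldl pvBGroupStep (bs, cur)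
       let blocks := if st.2 ≠ [] then st.1 ++ [st.2] else st.1
       (blocks.map (fun b => b.map pvGold), blocks.map (fun b => b.map pvPred))) := by
  induction ls generalizing bs cur with
  | nil =>
    simp only [List.foldl_nil, List.map_nil]
    by_cases hc : cur = []
    · subst hc; simp
    · have h1 : cur.map pvGold ≠ [] := by simpa using hc
      have h2 : cur.map pvPred ≠ [] := by simpa using hc
      simp [hc, h1, h2]
  | cons l ls ih =>
    simp only [List.map_cons, List.foldl_cons]
    by_cases hs : PySem.Str.strip l = ""
    · have hstep : pvAStep (bs.map (fun b => b.map pvGold), bs.map (fun b => b.map pvPred),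
          cur.map pvGold, cur.map pvPred) l
          = ((bs ++ [cur]).map (fun b => b.map pvGold), (bs ++ [cur]).map (fun b => b.map pvPred),
             [], []) := by
        simp [pvAStep, hs]
      have hstep' : pvBGroupStep (bs, cur) (PySem.Str.strip l) = (bs ++ [cur], []) := by
        simp [pvBGroupStep, hs]
      rw [hstep, hstep']
      have := ih (fun x hx h => hpre x (by simp [hx]) h) (bs ++ [cur]) []
      simpa using this
    · have htok : 2 ≤ (PySem.Str.split₀ (PySem.Str.strip l)).length :=
        hpre l (by simp) hs
      have hstep : pvAStep (bs.map (fun b => b.map pvGold), bs.map (fun b => b.map pvPred),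
          cur.map pvGold, cur.map pvPred) l
          = (bs.map (fun b => b.map pvGold), bs.map (fun b => b.map pvPred),
             (cur ++ [PySem.Str.strip l]).map pvGold, (cur ++ [PySem.Str.strip l]).map pvPred) := by
        simp only [pvAStep, hs, ne_eq, not_false_eq_true, if_true,
          slice_last_two _ htok]
        simp [pvGold_eq _ htok, pvPred_eq _ htok]
      have hstep' : pvBGroupStep (bs, cur) (PySem.Str.strip l)
          = (bs, cur ++ [PySem.Str.strip l]) := by
        simp [pvBGroupStep, hs]
      rw [hstep, hstep']
      exact ih (fun x hx h => hpre x (by simp [hx]) h) bs (cur ++ [PySem.Str.strip l])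

-- ===== VERDICT (by name: the statement is the Claim_ definition above) =====
theorem process_lines_prepare_gold_and_system_outputs_spec : Claim_equal_process_lines_prepare_gold_and_system_outputs := by
  intro lines _hdom hpre
  unfold Spec_process_lines_prepare_gold_and_system_outputs
  unfold process_lines_prepare_gold_and_system_outputs
  unfold process_lines_prepare_gold_and_system_outputs_alt
  have := pv_inv lines hpre [] []
  simpa using this
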